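-- pv_equiv track=rewrite | github.com/Leahxuliu/Data-Structure-And-Algorithm | Python/巨硬/C1.不相交最多相等pair对.py | count_max_pair
-- ===== SOURCE A (Python) =====
-- from collections import defaultdict
--
-- def count_max_pair(arr):
--     if arr == []:
--         return 0
--
--     info = defaultdict(list)
--     for i, each in enumerate(arr):
--         if i == len(arr) - 1:
--             continue
--         info[each + arr[i + 1]].append((i, i + 1))
--
--     info = sorted(info.items(), key = lambda x:len(x[1]))
--
--     res = 0
--     for k, v in info:
--         if res > len(v):
--             break
--
--         v = sorted(v, key =lambda s:s[1])
--         end = v[0][1]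
--         count = 0
--         for i in range(1, len(v)):
--             # 若是数成立的个数，那么count的起始值是1！
--             #     if v[i][0] > end:
--             #         count += 1
--             #         end = v[i][1]
--             # res = max(res, count)
--             if v[i][0] <= end:
--                 count += 1
--             else:
--                 end = v[i][1]
--         res = max(res, len(v) - count)
--
--     return res
-- ===== SOURCE B (Python) =====
-- def count_max_pair(arr):
--     # one linear pass: per adjacent-pair sum keep the greedy (end, count) state; track the max
--     state = {}
--     res = 0
--     for i in range(len(arr) - 1):
--         s = arr[i] + arr[i + 1]
--         if s in state:
--             end, cnt = state[s]
--             if i > end: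
--                 end, cnt = i + 1, cnt + 1
--         else:
--             end, cnt = i + 1, 1
--         state[s] = (end, cnt)
--         if cnt > res:
--             res = cnt
--     return res
-- ===== Notes on version B (the rewrite author's own statement) =====
-- stated objective: faster
-- what changed: A groups the adjacent-index pairs by sum in a dict, sorts the groups by size, re-sorts each group and rescans it greedily; B does one linear pass over the array keeping a single greedy (end, count) state per sum in a dict and tracking the running maximum, with no sorting at all.
import Mathlib
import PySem

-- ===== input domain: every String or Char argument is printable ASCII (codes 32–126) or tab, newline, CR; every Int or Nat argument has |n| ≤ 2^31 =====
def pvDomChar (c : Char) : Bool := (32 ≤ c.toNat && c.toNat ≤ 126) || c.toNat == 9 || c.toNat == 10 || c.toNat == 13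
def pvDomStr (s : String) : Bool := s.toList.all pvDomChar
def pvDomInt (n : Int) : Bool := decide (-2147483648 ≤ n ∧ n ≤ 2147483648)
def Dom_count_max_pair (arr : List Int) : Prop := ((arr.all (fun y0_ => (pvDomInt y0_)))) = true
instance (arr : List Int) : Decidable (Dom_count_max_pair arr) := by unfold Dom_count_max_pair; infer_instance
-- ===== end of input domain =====

-- B replaces A's group-sort-and-rescan with a single linear pass keeping one greedy
-- (end, count) state per adjacent-pair sum (objective: faster, no sorting).

-- ===== PORT A =====
-- body of A's outer loop after the break test (len(v) - count, after the greedy scan), factored as a helper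
def Fbody_A (kv : Int × List (Int × Int)) : Int :=
  let v := PySem.List.sorted kv.2 (fun s => s.2)
  let e := (PySem.List.pyGetD v 0 ((0 : Int), (0 : Int))).2   -- v[0][1]; v is nonempty wherever A reads it (exact)
  let st := (PySem.List.pyRange 1 (PySem.List.len v)).foldl
      (fun (st : Int × Int) i =>
        if (PySem.List.pyGetD v i ((0 : Int), (0 : Int))).1 ≤ st.1 then (st.1, st.2 + 1)
        else ((PySem.List.pyGetD v i ((0 : Int), (0 : Int))).2, st.2))
      (e, 0)
  PySem.List.len v - st.2

-- A's outer 'for k, v in info: if res > len(v): break; …' loop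
def loop_A : List (Int × List (Int × Int)) → Int → Int
  | [], res => res
  | kv :: rest, res =>
    if res > PySem.List.len kv.2 then res
    else loop_A rest (max res (Fbody_A kv))

def count_max_pair (arr : List Int) : Int :=
  if arr = [] then 0
  else
    let info := (PySem.List.enumerate arr).foldl
      (fun (d : PySem.Dict Int (List (Int × Int))) p =>
        if p.1 = PySem.List.len arr - 1 then d
        else
          let s := p.2 + PySem.List.pyGetD arr (p.1 + 1) 0   -- arr[i+1]: index is in range here (exact)
          d.insert s (d.getD s [] ++ [(p.1, p.1 + 1)]))
      PySem.Dict.empty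
    loop_A (PySem.List.sorted info.items (fun x => x.2.length)) 0

-- ===== PORT B =====
-- body of B's single loop, factored as a helper
def step_B (arr : List Int) (st : PySem.Dict Int (Int × Int) × Int) (i : Int) :
    PySem.Dict Int (Int × Int) × Int :=
  let s := PySem.List.pyGetD arr i 0 + PySem.List.pyGetD arr (i + 1) 0
  let ec : Int × Int :=
    match st.1.get? s with
    | some ec => if i > ec.1 then (i + 1, ec.2 + 1) else ec
    | none => (i + 1, 1)
  (st.1.insert s ec, if ec.2 > st.2 then ec.2 else st.2)

def count_max_pair_alt (arr : List Int) : Int :=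
  ((PySem.List.pyRange 0 (PySem.List.len arr - 1)).foldl (step_B arr)
    (PySem.Dict.empty, 0)).2

-- ===== PRECONDITION & SPEC =====
def Spec_count_max_pair (arr : List Int) (out : Int) : Prop := out = count_max_pair_alt arr
instance (arr : List Int) (out : Int) : Decidable (Spec_count_max_pair arr out) := by unfold Spec_count_max_pair; infer_instance

-- ===== CLAIM (what is proved, stated in full; the proofs are below) =====
def Claim_equal_count_max_pair : Prop := ∀ (arr : List Int), Dom_count_max_pair arr → Spec_count_max_pair arr (count_max_pair arr)

-- ===== LEMMAS AND PROOFS =====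

-- the adjacent-pair sum at index i
def kf (arr : List Int) (i : Int) : Int :=
  PySem.List.pyGetD arr i 0 + PySem.List.pyGetD arr (i + 1) 0

-- indices of L whose adjacent-pair sum is s
def filt (arr : List Int) (s : Int) (L : List Int) : List Int :=
  L.filter (fun j => kf arr j == s)

-- one step of the greedy disjoint-interval scan
def gstep : Option (Int × Int) → Int → Int × Int
  | none, i => (i + 1, 1)
  | some ec, i => if i > ec.1 then (i + 1, ec.2 + 1) else ec

def gfold (L : List Int) : Option (Int × Int) :=
  L.foldl (fun st i => some (gstep st i)) none

def gcnt (L : List Int) : Int := ((gfold L).getD (0, 0)).2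

def maxK (K : List Int) (f : Int → Int) : Int :=
  K.foldl (fun r s => max r (f s)) 0

-- A's dict build, rephrased over the index list
def buildD (arr L : List Int) : PySem.Dict Int (List (Int × Int)) :=
  L.foldl (fun d i => d.insert (kf arr i) (d.getD (kf arr i) [] ++ [(i, i + 1)]))
    PySem.Dict.empty

def keysOf (arr L : List Int) : List Int := PySem.List.dedup (L.map (kf arr))

-- the common value: maximum over sums of the greedy disjoint count of that sum's index group
def theMax (arr : List Int) : Int :=
  maxK (keysOf arr (PySem.List.pyRange 0 (PySem.List.len arr - 1)))
    (fun s => gcnt (filt arr s (PySem.List.pyRange 0 (PySem.List.len arr - 1))))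

def gstepS (st : Int × Int) (i : Int) : Int × Int :=
  if i > st.1 then (i + 1, st.2 + 1) else st

lemma gfold_append (L : List Int) (i : Int) :
    gfold (L ++ [i]) = some (gstep (gfold L) i) := by
  simp [gfold, List.foldl_append]

lemma gfoldS_some : ∀ (P : List Int) (x : Int × Int),
    P.foldl (fun st i => some (gstep st i)) (some x) = some (P.foldl gstepS x) := by
  intro P
  induction P with
  | nil => intro x; rfl
  | cons i P ih =>
      intro x
      simp only [List.foldl_cons]
      rw [ih]
      rfl

lemma gfold_cons (m : Int) (P : List Int) :
    gfold (m :: P) = some (P.foldl gstepS (m + 1, 1)) := by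
  simp only [gfold, List.foldl_cons]
  rw [show (some (gstep none m)) = some ((m + 1, 1) : Int × Int) from rfl, gfoldS_some]

lemma foldl_max_shift (K : List Int) (f : Int → Int) : ∀ (a b : Int),
    K.foldl (fun r s => max r (f s)) (max a b) = max (K.foldl (fun r s => max r (f s)) a) b := by
  induction K with
  | nil => intro a b; rfl
  | cons s K ih =>
      intro a b
      simp only [List.foldl_cons]
      rw [max_right_comm a b (f s), ih]

lemma maxK_congr (K : List Int) (f g : Int → Int) (h : ∀ s ∈ K, f s = g s) :
    maxK K f = maxK K g := by
  exact PySem.List.foldl_congr_mem K _ _ 0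
    (fun acc x hx => by show max acc (f x) = max acc (g x); rw [h x hx])

lemma maxK_append (K : List Int) (f : Int → Int) (s0 : Int) :
    maxK (K ++ [s0]) f = max (maxK K f) (f s0) := by
  simp [maxK, List.foldl_append]

lemma maxK_update_aux (K : List Int) (f g : Int → Int) (s0 : Int)
    (hn : K.Nodup) (hm : s0 ∈ K) (hfg : ∀ s ∈ K, s ≠ s0 → g s = f s) (hle : f s0 ≤ g s0) :
    ∀ a : Int, K.foldl (fun r s => max r (g s)) a = max (K.foldl (fun r s => max r (f s)) a) (g s0) := by
  induction K with
  | nil => cases hm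
  | cons s K ih =>
      intro a
      rcases List.nodup_cons.mp hn with ⟨hs, hn'⟩
      simp only [List.foldl_cons]
      by_cases h : s = s0
      · subst h
        have h1 : ∀ t ∈ K, g t = f t := by
          intro t ht
          exact hfg t (List.mem_cons_of_mem _ ht) (fun he => hs (he ▸ ht))
        rw [PySem.List.foldl_congr_mem K (fun r t => max r (g t)) (fun r t => max r (f t)) _
              (fun acc x hx => by show max acc (g x) = max acc (f x); rw [h1 x hx])]
        rw [foldl_max_shift, foldl_max_shift]
        omega
      · have hm' : s0 ∈ K := by
          rcases List.mem_cons.mp hm with h' | h'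
          · exact absurd h'.symm h
          · exact h'
        have hgs : g s = f s := hfg s List.mem_cons_self h
        rw [hgs, ih hn' hm' (fun t ht hne => hfg t (List.mem_cons_of_mem _ ht) hne)]

lemma maxK_update (K : List Int) (f g : Int → Int) (s0 : Int)
    (hn : K.Nodup) (hm : s0 ∈ K) (hfg : ∀ s ∈ K, s ≠ s0 → g s = f s) (hle : f s0 ≤ g s0) :
    maxK K g = max (maxK K f) (g s0) :=
  maxK_update_aux K f g s0 hn hm hfg hle 0

lemma dedup_snoc (xs : List Int) (x : Int) :
    PySem.List.dedup (xs ++ [x]) =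
      PySem.List.dedup xs ++ (if x ∈ xs then [] else [x]) := by
  have h1 : PySem.List.dedup (xs ++ [x]) = PySem.Set.add (PySem.List.dedup xs) x := by
    simp [PySem.List.dedup, PySem.Set.ofList, List.foldl_append]
  rw [h1]
  by_cases h : x ∈ xs
  · simp [PySem.Set.add, h]
  · simp [PySem.Set.add, h]

lemma enum_eq (xs : List Int) : ∀ (s : Int),
    PySem.List.enumerate xs s =
      (List.range xs.length).map (fun (j : Nat) => (s + (j : Int), xs.getD j 0)) := by
  induction xs with
  | nil => intro s; rfl
  | cons x xs ih =>
      intro s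
      rw [PySem.List.enumerate_cons, ih (s + 1)]
      simp only [List.length_cons, List.range_succ_eq_map, List.map_cons, List.map_map]
      congr 1
      · simp
      · apply List.map_congr_left
        intro j _
        simp only [Function.comp_apply, List.getD_cons_succ]
        refine Prod.ext ?_ rfl
        push_cast
        ring

lemma find?_keyed (F : Int → Int × List (Int × Int)) (hF : ∀ s, (F s).1 = s) (s0 : Int) :
    ∀ K : List Int,
      List.find? (fun p => p.1 == s0) (K.map F) = if s0 ∈ K then some (F s0) else none := by
  intro K
  induction K with
  | nil => simp
  | cons s K ih =>
      simp only [List.map_cons, List.find?_cons]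
      by_cases h : s = s0
      · subst h; simp [hF s]
      · have hb : ((F s).1 == s0) = false := by simp [hF s, h]
        have h2 : ¬ s0 = s := fun he => h he.symm
        simp [hb, ih, h2]

lemma any_keyed (F : Int → Int × List (Int × Int)) (hF : ∀ s, (F s).1 = s) (s0 : Int) :
    ∀ K : List Int, (K.map F).any (fun p => p.1 == s0) = decide (s0 ∈ K) := by
  intro K
  induction K with
  | nil => simp
  | cons s K ih =>
      simp only [List.map_cons, List.any_cons, ih, hF s]
      by_cases h : s0 = s
      · subst h; simp
      · have h2 : ¬ s = s0 := fun he => h he.symm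
        simp [h, h2]

lemma filt_append (arr : List Int) (s : Int) (L : List Int) (x : Int) :
    filt arr s (L ++ [x]) = filt arr s L ++ (if kf arr x = s then [x] else []) := by
  simp only [filt, List.filter_append]
  by_cases h : kf arr x = s <;> simp [h]

lemma filt_nil_of_not_mem (arr : List Int) (s : Int) (L : List Int)
    (h : s ∉ L.map (kf arr)) : filt arr s L = [] := by
  rw [filt, List.filter_eq_nil_iff]
  intro j hj hbeq
  exact h (List.mem_map.mpr ⟨j, hj, beq_iff_eq.mp hbeq⟩)

lemma filt_ne_nil_of_mem (arr : List Int) (s : Int) (L : List Int)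
    (h : s ∈ L.map (kf arr)) : filt arr s L ≠ [] := by
  obtain ⟨j, hjL, hjk⟩ := List.mem_map.mp h
  have : j ∈ filt arr s L := List.mem_filter.mpr ⟨hjL, by simp [hjk]⟩
  exact List.ne_nil_of_mem this

lemma buildD_items (arr : List Int) : ∀ L : List Int,
    (buildD arr L).items =
      (keysOf arr L).map (fun s => (s, (filt arr s L).map (fun i => (i, i + 1)))) := by
  intro L
  induction L using List.reverseRecOn with
  | nil => rfl
  | append_singleton L x ih =>
      have hfold : buildD arr (L ++ [x]) =
          (buildD arr L).insert (kf arr x)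
            ((buildD arr L).getD (kf arr x) [] ++ [(x, x + 1)]) := by
        simp [buildD, List.foldl_append]
      have hget : (buildD arr L).get? (kf arr x) =
          if kf arr x ∈ keysOf arr L
          then some ((filt arr (kf arr x) L).map (fun i => (i, i + 1))) else none := by
        rw [PySem.Dict.get?, ih, find?_keyed _ (fun s => rfl) (kf arr x)]
        by_cases h : kf arr x ∈ keysOf arr L <;> simp [h]
      have hcont : (buildD arr L).contains (kf arr x) = decide (kf arr x ∈ keysOf arr L) := by
        rw [PySem.Dict.contains, ih, any_keyed _ (fun s => rfl)]
      by_cases hmem : kf arr x ∈ L.map (kf arr)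
      · have hK : kf arr x ∈ keysOf arr L := (PySem.List.mem_dedup _ _).mpr hmem
        have hkeys : keysOf arr (L ++ [x]) = keysOf arr L := by
          simp only [keysOf, List.map_append, List.map_cons, List.map_nil]
          rw [dedup_snoc, if_pos hmem, List.append_nil]
        rw [hfold, PySem.Dict.insert, hcont, if_pos (by simp [hK])]
        show List.map _ (buildD arr L).items = _
        rw [ih, List.map_map, hkeys]
        apply List.map_congr_left
        intro s hsK
        simp only [Function.comp_apply]
        by_cases h : s = kf arr x
        · subst h
          have hv : (buildD arr L).getD (kf arr x) [] =
              (filt arr (kf arr x) L).map (fun i => (i, i + 1)) := by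
            rw [PySem.Dict.getD, hget, if_pos hK]
            rfl
          rw [if_pos (beq_self_eq_true _), hv, filt_append, if_pos rfl]
          simp
        · have hb : (s == kf arr x) = false := by simp [h]
          rw [if_neg (by simp [hb])]
          rw [filt_append, if_neg (fun he => h he.symm), List.append_nil]
      · have hK : kf arr x ∉ keysOf arr L := fun hc => hmem ((PySem.List.mem_dedup _ _).mp hc)
        have hkeys : keysOf arr (L ++ [x]) = keysOf arr L ++ [kf arr x] := by
          simp only [keysOf, List.map_append, List.map_cons, List.map_nil]
          rw [dedup_snoc, if_neg hmem]
        rw [hfold, PySem.Dict.insert, hcont, if_neg (by simp [hK])]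
        show (buildD arr L).items ++ _ = _
        rw [ih, hkeys, List.map_append]
        congr 1
        · apply List.map_congr_left
          intro s hsK
          rw [filt_append, if_neg (fun he => hK (by rw [he]; exact hsK)), List.append_nil]
        · have hv : (buildD arr L).getD (kf arr x) [] = [] := by
            rw [PySem.Dict.getD, hget, if_neg hK]
            rfl
          simp only [List.map_cons, List.map_nil]
          rw [hv, filt_append, if_pos rfl, filt_nil_of_not_mem arr _ L hmem]
          simp

lemma ag_rel : ∀ (P : List Int) (e c d : Int),
    (P.foldl (fun (st : Int × Int) i =>
        if i ≤ st.1 then (st.1, st.2 + 1) else (i + 1, st.2)) (e, c)).1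
      = (P.foldl gstepS (e, d)).1 ∧
    (P.foldl (fun (st : Int × Int) i =>
        if i ≤ st.1 then (st.1, st.2 + 1) else (i + 1, st.2)) (e, c)).2
      + (P.foldl gstepS (e, d)).2 = c + d + P.length := by
  intro P
  induction P with
  | nil => intro e c d; exact ⟨rfl, by simp⟩
  | cons i P ih =>
      intro e c d
      simp only [List.foldl_cons, gstepS]
      by_cases h : i ≤ e
      · have h' : ¬ i > e := by omega
        simp only [if_pos h, if_neg h']
        obtain ⟨h1, h2⟩ := ih e (c + 1) d
        refine ⟨h1, ?_⟩
        simp only [List.length_cons]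
        push_cast
        omega
      · have h' : i > e := by omega
        simp only [if_neg h, if_pos h']
        obtain ⟨h1, h2⟩ := ih (i + 1) c (d + 1)
        refine ⟨h1, ?_⟩
        simp only [List.length_cons]
        push_cast
        omega

lemma fold_idx (v : List (Int × Int)) (init : Int × Int) :
    (PySem.List.pyRange 1 (PySem.List.len v)).foldl
      (fun (st : Int × Int) i =>
        if (PySem.List.pyGetD v i ((0 : Int), (0 : Int))).1 ≤ st.1 then (st.1, st.2 + 1)
        else ((PySem.List.pyGetD v i ((0 : Int), (0 : Int))).2, st.2)) init
    = (v.drop 1).foldl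
        (fun (st : Int × Int) p =>
          if p.1 ≤ st.1 then (st.1, st.2 + 1) else (p.2, st.2)) init := by
  have h := PySem.List.foldl_pyRange_pyGetD v ((0 : Int), (0 : Int))
    (fun (st : Int × Int) p => if p.1 ≤ st.1 then (st.1, st.2 + 1) else (p.2, st.2))
    init (a := 1) (by norm_num)
  simpa using h

lemma Fbody_eq (M : List Int) (s : Int) (hM : M ≠ []) (hp : M.Pairwise (· < ·)) :
    Fbody_A (s, M.map (fun i => (i, i + 1))) = gcnt M := by
  obtain ⟨m0, M', rfl⟩ := List.exists_cons_of_ne_nil hM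
  have hsort : PySem.List.sorted ((m0 :: M').map (fun i => (i, i + 1)))
      (fun s => s.2) = (m0 :: M').map (fun i => (i, i + 1)) := by
    apply PySem.List.sorted_eq_of_perm_of_pairwise_lt _ _ _ (List.Perm.refl _)
    rw [List.pairwise_map]
    exact hp.imp (fun h => by omega)
  simp only [Fbody_A, hsort]
  rw [fold_idx]
  have he : (PySem.List.pyGetD ((m0 :: M').map (fun i => (i, i + 1))) 0 ((0 : Int), (0 : Int))).2
      = m0 + 1 := by
    rw [show ((0 : Int)) = ((0 : Nat) : Int) from rfl, PySem.List.pyGetD_natCast]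
    rfl
  rw [he]
  simp only [List.map_cons, List.drop_succ_cons, List.drop_zero, List.foldl_map]
  have hgc : gcnt (m0 :: M') = (M'.foldl gstepS (m0 + 1, 1)).2 := by
    rw [gcnt, gfold_cons]
    rfl
  rw [hgc]
  obtain ⟨h1, h2⟩ := ag_rel M' (m0 + 1) 0 1
  simp only [PySem.List.len, List.length_map, List.length_cons]
  push_cast at h2 ⊢
  omega

lemma inner_snd_mono (v : List (Int × Int)) : ∀ (L : List Int) (st : Int × Int),
    st.2 ≤ (L.foldl
      (fun (st : Int × Int) i =>
        if (PySem.List.pyGetD v i ((0 : Int), (0 : Int))).1 ≤ st.1 then (st.1, st.2 + 1)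
        else ((PySem.List.pyGetD v i ((0 : Int), (0 : Int))).2, st.2)) st).2 := by
  intro L
  induction L with
  | nil => intro st; exact le_refl _
  | cons i L ih =>
      intro st
      simp only [List.foldl_cons]
      refine le_trans ?_ (ih _)
      by_cases h : (PySem.List.pyGetD v i ((0 : Int), (0 : Int))).1 ≤ st.1 <;> simp [h]

lemma Fbody_le (kv : Int × List (Int × Int)) : Fbody_A kv ≤ PySem.List.len kv.2 := by
  have hlen : (PySem.List.sorted kv.2 (fun s => s.2)).length = kv.2.length :=
    (PySem.List.sorted_perm kv.2 (fun s => s.2) false).length_eq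
  have h := inner_snd_mono (PySem.List.sorted kv.2 (fun s => s.2))
    (PySem.List.pyRange 1 (PySem.List.len (PySem.List.sorted kv.2 (fun s => s.2))))
    ((PySem.List.pyGetD (PySem.List.sorted kv.2 (fun s => s.2)) 0 ((0 : Int), (0 : Int))).2, 0)
  simp only [Fbody_A, PySem.List.len, hlen] at *
  omega

lemma loopA_eq : ∀ (S : List (Int × List (Int × Int))) (res : Int),
    S.Pairwise (fun a b => a.2.length ≤ b.2.length) →
    (∀ it ∈ S, res ≤ PySem.List.len it.2) →
    loop_A S res = S.foldl (fun r it => max r (Fbody_A it)) res := by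
  intro S
  induction S with
  | nil => intro res _ _; rfl
  | cons kv S ih =>
      intro res hp hres
      rcases List.pairwise_cons.mp hp with ⟨hhd, hp'⟩
      have h1 : ¬ res > PySem.List.len kv.2 := not_lt.mpr (hres kv List.mem_cons_self)
      simp only [loop_A, if_neg h1, List.foldl_cons]
      apply ih _ hp'
      intro it hit
      have h2 : Fbody_A kv ≤ PySem.List.len kv.2 := Fbody_le kv
      have h3 : (kv.2.length : Int) ≤ (it.2.length : Int) := by
        exact_mod_cast hhd it hit
      have h4 : res ≤ PySem.List.len kv.2 := hres kv List.mem_cons_self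
      simp only [PySem.List.len] at *
      omega

lemma info_eq (arr : List Int) (h : arr ≠ []) :
    (PySem.List.enumerate arr).foldl
      (fun (d : PySem.Dict Int (List (Int × Int))) p =>
        if p.1 = PySem.List.len arr - 1 then d
        else
          let s := p.2 + PySem.List.pyGetD arr (p.1 + 1) 0
          d.insert s (d.getD s [] ++ [(p.1, p.1 + 1)]))
      PySem.Dict.empty
    = buildD arr (PySem.List.pyRange 0 (PySem.List.len arr - 1)) := by
  obtain ⟨n', hn⟩ : ∃ n', arr.length = n' + 1 := by
    cases arr with
    | nil => exact absurd rfl h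
    | cons a l => exact ⟨l.length, rfl⟩
  have hlen : PySem.List.len arr - 1 = ((n' : Nat) : Int) := by
    simp [PySem.List.len, hn]
  rw [show PySem.List.enumerate arr = PySem.List.enumerate arr 0 from rfl, enum_eq arr 0]
  rw [List.foldl_map, hn, List.range_succ, List.foldl_append]
  simp only [List.foldl_cons, List.foldl_nil]
  rw [if_pos (by rw [hlen]; ring)]
  have hL : PySem.List.pyRange 0 (PySem.List.len arr - 1) = (List.range n').map (fun (j : Nat) => (j : Int)) := by
    rw [hlen, PySem.List.pyRange_zero_natCast]
  rw [hL, buildD, List.foldl_map]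
  apply PySem.List.foldl_congr_mem
  intro d j hj
  have hjlt : j < n' := List.mem_range.mp hj
  have hne : ¬ ((0 : Int) + (j : Int) = PySem.List.len arr - 1) := by
    rw [hlen]
    omega
  show (if (0 : Int) + (j : Int) = PySem.List.len arr - 1 then d else _) = _
  rw [if_neg hne]
  simp only [kf, zero_add]
  rw [show arr.getD j 0 = PySem.List.pyGetD arr ((j : Nat) : Int) 0 from
    (PySem.List.pyGetD_natCast arr j 0).symm]

lemma Bfold_inv (arr : List Int) : ∀ L : List Int,
    (∀ s, (L.foldl (step_B arr) (PySem.Dict.empty, 0)).1.get? s = gfold (filt arr s L)) ∧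
    (L.foldl (step_B arr) (PySem.Dict.empty, 0)).2
      = maxK (keysOf arr L) (fun s => gcnt (filt arr s L)) := by
  intro L
  induction L using List.reverseRecOn with
  | nil =>
      constructor
      · intro s
        show PySem.Dict.empty.get? s = gfold (filt arr s [])
        rw [PySem.Dict.get?_empty]
        rfl
      · rfl
  | append_singleton L x ih =>
      obtain ⟨ih1, ih2⟩ := ih
      rw [List.foldl_append]
      simp only [List.foldl_cons, List.foldl_nil]
      set st := L.foldl (step_B arr) (PySem.Dict.empty, 0) with hst
      have hkx : PySem.List.pyGetD arr x 0 + PySem.List.pyGetD arr (x + 1) 0 = kf arr x := rfl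
      have hec : (match st.1.get? (kf arr x) with
          | some ec => if x > ec.1 then (x + 1, ec.2 + 1) else ec
          | none => ((x + 1 : Int), (1 : Int)))
          = gstep (gfold (filt arr (kf arr x) L)) x := by
        rw [ih1]
        cases gfold (filt arr (kf arr x) L) <;> rfl
      have hstep : step_B arr st x =
          (st.1.insert (kf arr x) (gstep (gfold (filt arr (kf arr x) L)) x),
            if (gstep (gfold (filt arr (kf arr x) L)) x).2 > st.2
            then (gstep (gfold (filt arr (kf arr x) L)) x).2 else st.2) := by
        show (st.1.insert _ _, _) = _
        rw [show (PySem.List.pyGetD arr x 0 + PySem.List.pyGetD arr (x + 1) 0) = kf arr x from rfl]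
        rw [hec]
      rw [hstep]
      constructor
      · intro s
        rw [PySem.Dict.get?_insert, filt_append]
        by_cases h : s = kf arr x
        · subst h
          rw [if_pos rfl, if_pos rfl, gfold_append]
        · rw [if_neg h, if_neg (fun he => h he.symm), List.append_nil, ih1]
      · have hmax : ∀ a b : Int, (if a > b then a else b) = max b a := by
          intro a b; split <;> omega
        show (if _ > st.2 then _ else st.2) = _
        rw [hmax]
        by_cases hmem : kf arr x ∈ L.map (kf arr)
        · have hK : kf arr x ∈ keysOf arr L := (PySem.List.mem_dedup _ _).mpr hmem
          have hkeys : keysOf arr (L ++ [x]) = keysOf arr L := by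
            simp only [keysOf, List.map_append, List.map_cons, List.map_nil]
            rw [dedup_snoc, if_pos hmem, List.append_nil]
          have hfne : filt arr (kf arr x) L ≠ [] := filt_ne_nil_of_mem arr _ L hmem
          obtain ⟨j0, P0, hP⟩ := List.exists_cons_of_ne_nil hfne
          have hsome : gfold (filt arr (kf arr x) L) = some (P0.foldl gstepS (j0 + 1, 1)) := by
            rw [hP, gfold_cons]
          have hle : gcnt (filt arr (kf arr x) L)
              ≤ (gstep (gfold (filt arr (kf arr x) L)) x).2 := by
            rw [gcnt, hsome]
            simp only [Option.getD_some, gstep]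
            split <;> simp
          have hupd := maxK_update (keysOf arr L)
            (fun s => gcnt (filt arr s L))
            (fun s => gcnt (filt arr s (L ++ [x])))
            (kf arr x)
            (PySem.List.nodup_dedup _) hK
            (fun s _ hne => by
              show gcnt (filt arr s (L ++ [x])) = gcnt (filt arr s L)
              rw [filt_append, if_neg (fun he => hne he.symm), List.append_nil])
            (by
              show gcnt (filt arr (kf arr x) L) ≤ gcnt (filt arr (kf arr x) (L ++ [x]))
              rw [filt_append, if_pos rfl]
              show _ ≤ ((gfold _).getD (0, 0)).2
              rw [gfold_append]
              exact hle)
          rw [hkeys, hupd, ih2]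
          congr 1
          show (gstep (gfold (filt arr (kf arr x) L)) x).2
              = gcnt (filt arr (kf arr x) (L ++ [x]))
          rw [filt_append, if_pos rfl, gcnt, gfold_append, Option.getD_some]
        · have hK : kf arr x ∉ keysOf arr L := fun hc => hmem ((PySem.List.mem_dedup _ _).mp hc)
          have hkeys : keysOf arr (L ++ [x]) = keysOf arr L ++ [kf arr x] := by
            simp only [keysOf, List.map_append, List.map_cons, List.map_nil]
            rw [dedup_snoc, if_neg hmem]
          have hnil : filt arr (kf arr x) L = [] := filt_nil_of_not_mem arr _ L hmem
          have hone : gcnt (filt arr (kf arr x) (L ++ [x])) = 1 := by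
            rw [filt_append, if_pos rfl, hnil, List.nil_append]
            rfl
          have hec1 : (gstep (gfold (filt arr (kf arr x) L)) x).2 = 1 := by
            rw [hnil]
            rfl
          rw [hkeys, maxK_append, hec1]
          rw [maxK_congr (keysOf arr L)
            (fun s => gcnt (filt arr s (L ++ [x]))) (fun s => gcnt (filt arr s L))
            (fun s hs => by
              show gcnt (filt arr s (L ++ [x])) = gcnt (filt arr s L)
              have hne : kf arr x ≠ s := fun he => hK (by rw [he]; exact hs)
              rw [filt_append, if_neg hne, List.append_nil])]
          rw [hone, ih2]

lemma A_eq_theMax (arr : List Int) : count_max_pair arr = theMax arr := by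
  by_cases h : arr = []
  · subst h
    decide
  · rw [count_max_pair, if_neg h, info_eq arr h]
    set L := PySem.List.pyRange 0 (PySem.List.len arr - 1) with hLdef
    have hpair := PySem.List.sorted_pairwise ((buildD arr L).items) (fun x => x.2.length)
    have hloop := loopA_eq (PySem.List.sorted ((buildD arr L).items) (fun x => x.2.length)) 0
      hpair (fun it _ => by simp [PySem.List.len])
    rw [hloop]
    have hperm := PySem.List.sorted_perm ((buildD arr L).items) (fun x => x.2.length) false
    rw [@List.Perm.foldl_eq _ _ (fun r it => max r (Fbody_A it)) _ _
      ⟨fun r a b => max_right_comm r (Fbody_A a) (Fbody_A b)⟩ hperm 0]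
    rw [buildD_items arr L, List.foldl_map]
    have hLpair : L.Pairwise (· < ·) := by
      obtain ⟨n', hn⟩ : ∃ n', arr.length = n' + 1 := by
        cases arr with
        | nil => exact absurd rfl h
        | cons a l => exact ⟨l.length, rfl⟩
      have hlen : PySem.List.len arr - 1 = ((n' : Nat) : Int) := by
        simp [PySem.List.len, hn]
      rw [hLdef, hlen, PySem.List.pyRange_zero_natCast]
      rw [List.pairwise_map]
      exact List.pairwise_lt_range.imp (fun hab => by exact_mod_cast hab)
    show maxK (keysOf arr L)
        (fun s => Fbody_A (s, (filt arr s L).map (fun i => (i, i + 1)))) = theMax arr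
    rw [maxK_congr (keysOf arr L) _ (fun s => gcnt (filt arr s L))
      (fun s hs => by
        apply Fbody_eq
        · exact filt_ne_nil_of_mem arr s L ((PySem.List.mem_dedup _ _).mp hs)
        · exact hLpair.filter _)]
    rfl

lemma B_eq_theMax (arr : List Int) : count_max_pair_alt arr = theMax arr := by
  exact (Bfold_inv arr (PySem.List.pyRange 0 (PySem.List.len arr - 1))).2

-- ===== VERDICT (by name: the statement is the Claim_ definition above) =====
theorem count_max_pair_spec : Claim_equal_count_max_pair := by
  intro arr _
  show count_max_pair arr = count_max_pair_alt arr
  rw [A_eq_theMax, B_eq_theMax]
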